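-- pv_equiv track=rewrite | github.com/jtlevine18/weather-ai-pipeline | tests/eval_rag.py | check_themes
-- ===== SOURCE A (Python) =====
-- def check_themes(docs, themes):
--     """Return set of themes found via substring match in any retrieved doc."""
--     found = set()
--     for theme in themes:
--         tl = theme.lower()
--         for doc in docs:
--             if tl in doc.lower():
--                 found.add(theme)
--                 break
--     return found
-- ===== SOURCE B (Python) =====
-- def check_themes(docs, themes):
--     """Return set of themes found via substring match in any retrieved doc.
--
--     Doc-outer strategy: each doc is lowercased once, and a pending set of
--     lowercased patterns shrinks as patterns are matched, with an early exit
--     when nothing is left to find; the result set is emitted in themes order.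
--     """
--     pending = dict.fromkeys(t.lower() for t in themes)
--     matched = set()
--     for doc in docs:
--         if not pending:
--             break
--         dl = doc.lower()
--         for tl in [tl for tl in pending if tl in dl]:
--             matched.add(tl)
--             del pending[tl]
--     return {t for t in themes if t.lower() in matched}
-- ===== Notes on version B (the rewrite author's own statement) =====
-- stated objective: faster
-- what changed: Inverted the loop nesting: instead of scanning all docs per theme (lowercasing each doc once per theme), B makes one pass over the docs, lowercasing each doc once, matching it against a shrinking pending set of lowercased patterns with an early exit once all themes are found, then emits the result set in themes order.
import Mathlib
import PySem

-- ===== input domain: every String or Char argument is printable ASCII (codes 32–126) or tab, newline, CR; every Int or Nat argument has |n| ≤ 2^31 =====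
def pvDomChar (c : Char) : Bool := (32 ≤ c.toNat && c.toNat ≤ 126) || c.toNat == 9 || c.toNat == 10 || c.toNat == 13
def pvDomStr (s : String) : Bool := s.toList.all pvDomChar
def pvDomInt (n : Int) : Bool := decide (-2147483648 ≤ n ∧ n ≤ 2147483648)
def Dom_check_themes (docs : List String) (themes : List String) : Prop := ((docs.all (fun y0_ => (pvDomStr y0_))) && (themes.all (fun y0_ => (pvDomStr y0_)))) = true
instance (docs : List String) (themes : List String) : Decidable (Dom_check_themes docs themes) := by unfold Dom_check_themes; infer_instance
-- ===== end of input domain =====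

-- B inverts the loop nesting (one pass over docs against a shrinking pending set, early exit); return value only, A is total.

-- ===== PORT A =====
-- inner 'for doc in docs: … break' loop of A: true iff some doc (scanned in order) contains tl
def checkInnerA (tl : String) (docs : List String) : Bool :=
  match docs with
  | [] => false
  | d :: rest => if PySem.Str.isIn tl (PySem.Str.lower d) then true else checkInnerA tl rest

def check_themes (docs : List String) (themes : List String) : List String :=
  themes.foldl (fun found theme =>
    let tl := PySem.Str.lower theme
    if checkInnerA tl docs then PySem.Set.add found theme else found) PySem.Set.empty

-- ===== PORT B =====
-- the 'for doc in docs' loop of Source B: state = (pending, matched), early break on empty pending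
def altLoopB (docs : List String) (pending : List String) (matched : PySem.Set String) : PySem.Set String :=
  match docs with
  | [] => matched
  | d :: rest =>
    if pending.isEmpty then matched
    else
      let dl := PySem.Str.lower d
      let hit := pending.filter (fun tl => PySem.Str.isIn tl dl)
      altLoopB rest (pending.filter (fun tl => !PySem.Str.isIn tl dl)) (PySem.Set.update matched hit)

def check_themes_alt (docs : List String) (themes : List String) : List String :=
  let pending := PySem.List.dedup (themes.map PySem.Str.lower)
  let matched := altLoopB docs pending PySem.Set.empty
  themes.foldl (fun s t =>
    if PySem.Set.contains matched (PySem.Str.lower t) then PySem.Set.add s t else s) PySem.Set.empty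

-- ===== PRECONDITION & SPEC =====
def Spec_check_themes (docs : List String) (themes : List String) (out : List String) : Prop := out = check_themes_alt docs themes
instance (docs : List String) (themes : List String) (out : List String) : Decidable (Spec_check_themes docs themes out) := by unfold Spec_check_themes; infer_instance

-- ===== CLAIM (what is proved, stated in full; the proofs are below) =====
def Claim_equal_check_themes : Prop := ∀ (docs : List String) (themes : List String), Dom_check_themes docs themes → Spec_check_themes docs themes (check_themes docs themes)

-- ===== LEMMAS AND PROOFS =====

theorem checkInnerA_iff (tl : String) (docs : List String) :
    checkInnerA tl docs = true ↔ ∃ d ∈ docs, PySem.Str.isIn tl (PySem.Str.lower d) = true := by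
  induction docs with
  | nil => simp [checkInnerA]
  | cons d rest ih =>
    simp only [checkInnerA, List.mem_cons]
    split_ifs with h
    · simp only [true_iff]; exact ⟨d, Or.inl rfl, h⟩
    · rw [ih]
      constructor
      · rintro ⟨e, he, hm⟩; exact ⟨e, Or.inr he, hm⟩
      · rintro ⟨e, he | he, hm⟩
        · exact absurd (he ▸ hm) (by simpa using h)
        · exact ⟨e, he, hm⟩

theorem altLoopB_mem (docs : List String) (pending : List String) (matched : PySem.Set String)
    (x : String) :
    x ∈ altLoopB docs pending matched ↔
      x ∈ matched ∨ (x ∈ pending ∧ ∃ d ∈ docs, PySem.Str.isIn x (PySem.Str.lower d) = true) := by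
  induction docs generalizing pending matched with
  | nil => simp [altLoopB]
  | cons d rest ih =>
    simp only [altLoopB]
    split_ifs with h
    · have hp : pending = [] := List.isEmpty_iff.mp h
      simp [hp]
    · rw [ih]
      simp only [PySem.Set.mem_update, List.mem_filter, List.mem_cons, Bool.not_eq_eq_eq_not,
        Bool.not_true]
      constructor
      · rintro ((hx | ⟨hp, hm⟩) | ⟨⟨hp, hnm⟩, e, he, hme⟩)
        · exact Or.inl hx
        · exact Or.inr ⟨hp, d, Or.inl rfl, hm⟩
        · exact Or.inr ⟨hp, e, Or.inr he, hme⟩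
      · rintro (hx | ⟨hp, e, he | he, hme⟩)
        · exact Or.inl (Or.inl hx)
        · exact Or.inl (Or.inr ⟨hp, he ▸ hme⟩)
        · by_cases hm : PySem.Str.isIn x (PySem.Str.lower d) = true
          · exact Or.inl (Or.inr ⟨hp, hm⟩)
          · exact Or.inr ⟨⟨hp, by simpa using hm⟩, e, he, hme⟩

-- ===== VERDICT (by name: the statement is the Claim_ definition above) =====
theorem check_themes_spec : Claim_equal_check_themes := by
  intro docs themes _
  unfold Spec_check_themes check_themes check_themes_alt
  apply PySem.List.foldl_congr_mem'
  intro t ht s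
  have hpend : PySem.Str.lower t ∈ PySem.List.dedup (themes.map PySem.Str.lower) := by
    exact (PySem.List.mem_dedup _ _).mpr (List.mem_map_of_mem ht)
  have : PySem.Set.contains
      (altLoopB docs (PySem.List.dedup (themes.map PySem.Str.lower)) PySem.Set.empty)
      (PySem.Str.lower t) = checkInnerA (PySem.Str.lower t) docs := by
    by_cases hc : checkInnerA (PySem.Str.lower t) docs = true
    · rw [hc]
      rw [PySem.Set.contains_iff, altLoopB_mem]
      exact Or.inr ⟨hpend, (checkInnerA_iff _ _).mp hc⟩
    · rw [Bool.not_eq_true] at hc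
      rw [hc, ← Bool.not_eq_true, PySem.Set.contains_iff, altLoopB_mem]
      rintro (hx | ⟨_, hex⟩)
      · simp [PySem.Set.empty] at hx
      · exact absurd ((checkInnerA_iff _ _).mpr hex) (by simp [hc])
  rw [this]
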